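-- pv_equiv track=rewrite | github.com/Janukrishna007/Print-forge | backend/apps/products/services.py | detect_view
-- ===== SOURCE A (Python) =====
-- VIEW_NAMES = {"front", "back", "side"}
--
-- def detect_view(stem: str) -> tuple[str, str]:
--     lowered = stem.lower().strip()
--     for view_name in VIEW_NAMES:
--         suffix = f"-{view_name}"
--         if lowered.endswith(suffix):
--             return lowered[: -len(suffix)], view_name
--         suffix = f"_{view_name}"
--         if lowered.endswith(suffix):
--             return lowered[: -len(suffix)], view_name
--         suffix = f" {view_name}"
--         if lowered.endswith(suffix):
--             return lowered[: -len(suffix)], view_name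
--     return lowered, "front"
-- ===== SOURCE B (Python) =====
-- VIEW_NAMES = {"front", "back", "side"}
--
--
-- def detect_view(stem: str) -> tuple[str, str]:
--     # One backwards scan to the last separator, then a single set lookup,
--     # instead of testing all nine separator+view suffixes.
--     lowered = stem.lower().strip()
--     tail = []
--     for j in range(len(lowered) - 1, -1, -1):
--         if lowered[j] in "-_ ":
--             view = "".join(reversed(tail))
--             if view in VIEW_NAMES:
--                 return lowered[:j], view
--             break
--         tail.append(lowered[j])
--     return lowered, "front"
-- ===== Notes on version B (the rewrite author's own statement) =====
-- stated objective: alternative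
-- what changed: Instead of testing all nine separator+view suffixes with endswith, B scans backwards once to the last separator character and does a single view-name set lookup on the tail.
import Mathlib
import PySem

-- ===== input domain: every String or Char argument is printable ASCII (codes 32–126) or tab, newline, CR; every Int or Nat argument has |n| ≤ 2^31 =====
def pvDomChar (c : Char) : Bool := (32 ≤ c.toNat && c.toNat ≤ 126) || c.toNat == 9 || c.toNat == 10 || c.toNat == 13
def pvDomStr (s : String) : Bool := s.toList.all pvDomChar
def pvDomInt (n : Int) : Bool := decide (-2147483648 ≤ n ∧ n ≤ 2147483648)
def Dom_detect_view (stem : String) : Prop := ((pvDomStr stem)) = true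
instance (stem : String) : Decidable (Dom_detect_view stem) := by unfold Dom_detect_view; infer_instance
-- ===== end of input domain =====

-- B replaces A's nine suffix tests by one backwards scan to the last separator plus a single view-name lookup (objective: alternative).

-- ===== PORT A =====
-- the for-loop over VIEW_NAMES (iteration order is irrelevant: at most one suffix can match)
def detect_view_go (lowered : String) : List String → String × String
  | [] => (lowered, "front")
  | view_name :: rest =>
    let suffix := "-" ++ view_name
    if PySem.Str.endswith lowered suffix then
      (PySem.Str.slice lowered none (some (-(PySem.Str.len suffix))), view_name)
    else
      let suffix2 := "_" ++ view_name
      if PySem.Str.endswith lowered suffix2 then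
        (PySem.Str.slice lowered none (some (-(PySem.Str.len suffix2))), view_name)
      else
        let suffix3 := " " ++ view_name
        if PySem.Str.endswith lowered suffix3 then
          (PySem.Str.slice lowered none (some (-(PySem.Str.len suffix3))), view_name)
        else detect_view_go lowered rest

def detect_view (stem : String) : String × String :=
  detect_view_go (PySem.Str.strip (PySem.Str.lower stem)) ["front", "back", "side"]

-- ===== PORT B =====
-- the `for j in range(len(lowered)-1, -1, -1)` scan of Source B, as recursion on the reversed char list;
-- `lowered[j] in "-_ "` and `view in VIEW_NAMES` are the explicit membership disjunctions (exact here)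
def detect_view_alt_go (lowered : String) : List Char → List Char → String × String
  | [], _tail => (lowered, "front")
  | c :: rest, tail =>
    if c == '-' || c == '_' || c == ' ' then
      let view := String.ofList tail.reverse
      if view = "front" ∨ view = "back" ∨ view = "side" then
        (String.ofList rest.reverse, view)
      else (lowered, "front")
    else detect_view_alt_go lowered rest (tail ++ [c])

def detect_view_alt (stem : String) : String × String :=
  let lowered := PySem.Str.strip (PySem.Str.lower stem)
  detect_view_alt_go lowered lowered.toList.reverse []

-- ===== PRECONDITION & SPEC =====
def Spec_detect_view (stem : String) (out : String × String) : Prop := out = detect_view_alt stem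
instance (stem : String) (out : String × String) : Decidable (Spec_detect_view stem out) := by unfold Spec_detect_view; infer_instance

-- ===== CLAIM (what is proved, stated in full; the proofs are below) =====
def Claim_equal_detect_view : Prop := ∀ (stem : String), Dom_detect_view stem → Spec_detect_view stem (detect_view stem)

-- ===== LEMMAS AND PROOFS =====

-- separator test shared by the lemmas (the Bool test B's port uses inline)
def pvSep (c : Char) : Bool := c == '-' || c == '_' || c == ' '

lemma pvSep_head_of_dropWhile {l r : List Char} {c : Char}
    (h : l.dropWhile (fun x => !pvSep x) = c :: r) : pvSep c = true := by
  induction l with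
  | nil => simp at h
  | cons a t ih =>
    rw [List.dropWhile_cons] at h
    by_cases ha : pvSep a = true
    · rw [if_neg (by simp [ha])] at h
      injection h with h1 _
      exact h1 ▸ ha
    · rw [if_pos (by simp [Bool.not_eq_true] at ha ⊢; exact ha)] at h
      exact ih h

-- B's scan skips the non-separator chars, accumulating them onto tail
lemma altGo_skip (lw : String) (pre : List Char) (hpre : ∀ x ∈ pre, pvSep x = false) :
    ∀ (rest tail : List Char),
      detect_view_alt_go lw (pre ++ rest) tail = detect_view_alt_go lw rest (tail ++ pre) := by
  induction pre with
  | nil => intro rest tail; simp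
  | cons a p ih =>
    intro rest tail
    have ha' : (a == '-' || a == '_' || a == ' ') = false := hpre a (by simp)
    simp only [List.cons_append, detect_view_alt_go, ha', Bool.false_eq_true, if_false]
    rw [ih (fun x hx => hpre x (by simp [hx])) rest (tail ++ [a])]
    simp

-- a word+separator suffix matches iff the scanned prefix is exactly the word and the separator char agrees
lemma prefix_sep_iff (pre : List Char) (hpre : ∀ x ∈ pre, pvSep x = false) :
    ∀ (v : List Char), (∀ x ∈ v, pvSep x = false) →
    ∀ (s c : Char), pvSep s = true → pvSep c = true →
    ∀ (r : List Char), ((v ++ [s]) <+: (pre ++ c :: r)) ↔ (v = pre ∧ s = c) := by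
  induction pre with
  | nil =>
    intro v hv s c hs hc r
    cases v with
    | nil => simp [List.prefix_cons_iff]
    | cons b v' =>
      simp only [List.cons_append, List.nil_append, List.cons_prefix_cons]
      constructor
      · rintro ⟨hbc, -⟩
        exact absurd hc (hbc ▸ (by simp [hv b (by simp)]))
      · rintro ⟨h, -⟩; exact absurd h (by simp)
  | cons a p ih =>
    intro v hv s c hs hc r
    have ha : pvSep a = false := hpre a (by simp)
    cases v with
    | nil =>
      simp only [List.nil_append, List.cons_append, List.cons_prefix_cons]
      constructor
      · rintro ⟨hsa, -⟩
        exact absurd hs (hsa ▸ (by simp [ha]))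
      · rintro ⟨h, -⟩; exact absurd h (by simp)
    | cons b v' =>
      simp only [List.cons_append, List.cons_prefix_cons]
      rw [ih (fun x hx => hpre x (by simp [hx])) v' (fun x hx => hv x (by simp [hx])) s c hs hc r]
      constructor
      · rintro ⟨hb, hv', hsc⟩; exact ⟨by rw [hb, hv'], hsc⟩
      · rintro ⟨h, hsc⟩
        injection h with h1 h2
        exact ⟨h1, h2, hsc⟩

-- if the whole string has no separator chars, no separator-bearing suffix can match
lemma endswith_false_of_nonsep (lw : String) (hall : ∀ x ∈ lw.toList, pvSep x = false)
    (p : List Char) (c : Char) (hc : pvSep c = true) (hmem : c ∈ p) :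
    PySem.Chars.endswith lw.toList p = false := by
  by_contra h
  have ht : PySem.Chars.endswith lw.toList p = true := by
    revert h; cases PySem.Chars.endswith lw.toList p <;> simp
  have h' : p <:+ lw.toList := (PySem.Chars.endswith_iff _ _).mp ht
  exact absurd (hall c (List.IsSuffix.mem hmem h')) (by simp [hc])

-- lowered[:-k] as a list computation
lemma slice_helper (lw : String) (a b : List Char) (n : Int)
    (hb : (b.length : Int) = n) (hpos : b ≠ []) (hl : lw.toList = a ++ b) :
    PySem.Str.slice lw none (some (-n)) = String.ofList a := by
  subst hb
  apply String.toList_inj.mp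
  rw [String.toList_ofList, PySem.Str.toList_slice, PySem.Chars.slice_eq_listSlice]
  rw [PySem.List.slice_to_neg_natCast lw.toList b.length (by
    cases b with | nil => exact absurd rfl hpos | cons x xs => simp)]
  rw [hl]
  have h : (a ++ b).length - b.length = a.length := by simp
  rw [h, List.take_left]

-- the endswith condition, under the takeWhile/dropWhile decomposition of the reversed string
lemma endswith_iff_pre (lw : String) (pre rest' : List Char) (c : Char)
    (hrl : lw.toList.reverse = pre ++ c :: rest')
    (hpre : ∀ x ∈ pre, pvSep x = false) (hc : pvSep c = true)
    (p : List Char) (s : Char) (v : List Char) (hsuf : p = s :: v)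
    (hv : ∀ x ∈ v, pvSep x = false) (hs : pvSep s = true) :
    (PySem.Chars.endswith lw.toList p = true ↔ (pre = v.reverse ∧ c = s)) := by
  rw [PySem.Chars.endswith_iff, ← List.reverse_prefix, hrl, hsuf]
  simp only [List.reverse_cons]
  rw [prefix_sep_iff pre hpre v.reverse (fun x hx => hv x (by simpa using hx)) s c hs hc rest']
  constructor
  · rintro ⟨h1, h2⟩; exact ⟨h1.symm, h2.symm⟩
  · rintro ⟨h1, h2⟩; exact ⟨h1.symm, h2.symm⟩

-- core equivalence, for an arbitrary (already lowered/stripped) string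
set_option maxRecDepth 8192 in
set_option maxHeartbeats 1600000 in
lemma core_eq (lw : String) :
    detect_view_go lw ["front", "back", "side"] = detect_view_alt_go lw lw.toList.reverse [] := by
  obtain ⟨pre, hpre_def⟩ : ∃ p, List.takeWhile (fun x => !pvSep x) lw.toList.reverse = p := ⟨_, rfl⟩
  obtain ⟨rest, hrest_def⟩ : ∃ p, List.dropWhile (fun x => !pvSep x) lw.toList.reverse = p := ⟨_, rfl⟩
  have hsplit : pre ++ rest = lw.toList.reverse := by
    rw [← hpre_def, ← hrest_def]; exact List.takeWhile_append_dropWhile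
  have hpre : ∀ x ∈ pre, pvSep x = false := by
    intro x hx
    have := List.mem_takeWhile_imp (hpre_def ▸ hx)
    simpa using this
  have hB : detect_view_alt_go lw lw.toList.reverse [] = detect_view_alt_go lw rest pre := by
    rw [← hsplit, altGo_skip lw pre hpre rest []]
    simp
  rw [hB]
  cases hrest : rest with
  | nil =>
    -- no separator anywhere: every suffix test fails, both return (lw, "front")
    have hall : ∀ x ∈ lw.toList, pvSep x = false := by
      intro x hx
      have hx' : x ∈ pre ++ rest := by rw [hsplit]; simpa using hx
      rw [hrest] at hx'
      exact hpre x (by simpa using hx')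
    have e1 := endswith_false_of_nonsep lw hall ['-','f','r','o','n','t'] '-' rfl (by simp)
    have e2 := endswith_false_of_nonsep lw hall ['_','f','r','o','n','t'] '_' rfl (by simp)
    have e3 := endswith_false_of_nonsep lw hall [' ','f','r','o','n','t'] ' ' rfl (by simp)
    have e4 := endswith_false_of_nonsep lw hall ['-','b','a','c','k'] '-' rfl (by simp)
    have e5 := endswith_false_of_nonsep lw hall ['_','b','a','c','k'] '_' rfl (by simp)
    have e6 := endswith_false_of_nonsep lw hall [' ','b','a','c','k'] ' ' rfl (by simp)
    have e7 := endswith_false_of_nonsep lw hall ['-','s','i','d','e'] '-' rfl (by simp)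
    have e8 := endswith_false_of_nonsep lw hall ['_','s','i','d','e'] '_' rfl (by simp)
    have e9 := endswith_false_of_nonsep lw hall [' ','s','i','d','e'] ' ' rfl (by simp)
    simp [detect_view_go, detect_view_alt_go, e1, e2, e3, e4, e5, e6, e7, e8, e9]
  | cons c rest' =>
    have hc : pvSep c = true := pvSep_head_of_dropWhile (hrest ▸ hrest_def)
    have hrl : lw.toList.reverse = pre ++ c :: rest' := by rw [← hsplit, hrest]
    have hl : lw.toList = rest'.reverse ++ ([c] ++ pre.reverse) := by
      have := congrArg List.reverse hrl
      simpa [List.append_assoc] using this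
    have hcb : (c == '-' || c == '_' || c == ' ') = true := hc
    -- the nine suffix conditions
    have h1 := endswith_iff_pre lw pre rest' c hrl hpre hc ['-','f','r','o','n','t'] '-' ['f','r','o','n','t'] rfl (by simp [pvSep]) rfl
    have h2 := endswith_iff_pre lw pre rest' c hrl hpre hc ['_','f','r','o','n','t'] '_' ['f','r','o','n','t'] rfl (by simp [pvSep]) rfl
    have h3 := endswith_iff_pre lw pre rest' c hrl hpre hc [' ','f','r','o','n','t'] ' ' ['f','r','o','n','t'] rfl (by simp [pvSep]) rfl
    have h4 := endswith_iff_pre lw pre rest' c hrl hpre hc ['-','b','a','c','k'] '-' ['b','a','c','k'] rfl (by simp [pvSep]) rfl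
    have h5 := endswith_iff_pre lw pre rest' c hrl hpre hc ['_','b','a','c','k'] '_' ['b','a','c','k'] rfl (by simp [pvSep]) rfl
    have h6 := endswith_iff_pre lw pre rest' c hrl hpre hc [' ','b','a','c','k'] ' ' ['b','a','c','k'] rfl (by simp [pvSep]) rfl
    have h7 := endswith_iff_pre lw pre rest' c hrl hpre hc ['-','s','i','d','e'] '-' ['s','i','d','e'] rfl (by simp [pvSep]) rfl
    have h8 := endswith_iff_pre lw pre rest' c hrl hpre hc ['_','s','i','d','e'] '_' ['s','i','d','e'] rfl (by simp [pvSep]) rfl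
    have h9 := endswith_iff_pre lw pre rest' c hrl hpre hc [' ','s','i','d','e'] ' ' ['s','i','d','e'] rfl (by simp [pvSep]) rfl
    -- B's view-name comparison as a statement about pre
    have hview : ∀ (w : String), (String.ofList pre.reverse = w ↔ pre = w.toList.reverse) := by
      intro w
      constructor
      · intro h
        have := congrArg String.toList h
        rw [String.toList_ofList] at this
        rw [← this]; simp
      · intro h; rw [h]; simp [String.ofList_toList]
    have hcs : c = '-' ∨ c = '_' ∨ c = ' ' := by
      have h := hc
      simp only [pvSep, Bool.or_eq_true, beq_iff_eq] at h
      exact or_assoc.mp h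
    have hslice : ∀ (w : List Char), pre = w.reverse →
        ∀ (n : Int), ((w.length + 1 : Nat) : Int) = n →
        PySem.Str.slice lw none (some (-n)) = String.ofList rest'.reverse := by
      intro w hw n hn
      refine slice_helper lw rest'.reverse ([c] ++ pre.reverse) n ?_ (by simp) hl
      rw [← hn]
      simp [hw]
    by_cases hf : pre = ['t','n','o','r','f']
    · have hsl := hslice ['f','r','o','n','t'] (by simp [hf]) 6 (by norm_num)
      rcases hcs with hc' | hc' | hc' <;> subst hc' <;>
        simp [detect_view_go, detect_view_alt_go, h1, h2, h3, h4, h5, h6, h7, h8, h9, hview, hf, hsl]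
    · by_cases hbk : pre = ['k','c','a','b']
      · have hsl := hslice ['b','a','c','k'] (by simp [hbk]) 5 (by norm_num)
        rcases hcs with hc' | hc' | hc' <;> subst hc' <;>
          simp [detect_view_go, detect_view_alt_go, h1, h2, h3, h4, h5, h6, h7, h8, h9, hview, hbk, hsl]
      · by_cases hsd : pre = ['e','d','i','s']
        · have hsl := hslice ['s','i','d','e'] (by simp [hsd]) 5 (by norm_num)
          rcases hcs with hc' | hc' | hc' <;> subst hc' <;>
            simp [detect_view_go, detect_view_alt_go, h1, h2, h3, h4, h5, h6, h7, h8, h9, hview, hsd, hsl]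
        · -- tail is not a view name: both fall through to (lw, "front")
          simp [detect_view_go, detect_view_alt_go, h1, h2, h3, h4, h5, h6, h7, h8, h9, hview, hf, hbk, hsd, hcb]

-- ===== VERDICT (by name: the statement is the Claim_ definition above) =====
theorem detect_view_spec : Claim_equal_detect_view := by
  intro stem _
  show detect_view stem = detect_view_alt stem
  unfold detect_view detect_view_alt
  exact core_eq _
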